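-- pv_equiv track=rewrite | github.com/MobileInspirations/summit-customer-compass | backend/app/services/categorization_service.py | _calculate_bucket_scores
-- ===== SOURCE A (Python) =====
-- from typing import List, Dict, Tuple
--
-- def _calculate_bucket_scores(tags: List[str], bucket_keywords: Dict[str, List[str]]) -> Dict[str, int]:
--     """Calculate scores for each bucket based on tag matches"""
--     scores = {bucket: 0 for bucket in bucket_keywords.keys()}
--
--     for tag in tags:
--         tag_lower = tag.lower()
--         for bucket, keywords in bucket_keywords.items():
--             if any(keyword.lower() in tag_lower for keyword in keywords):
--                 scores[bucket] += 1
--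
--     return scores
-- ===== SOURCE B (Python) =====
-- from typing import List, Dict
--
-- def _calculate_bucket_scores(tags: List[str], bucket_keywords: Dict[str, List[str]]) -> Dict[str, int]:
--     """Keyword-major inverted-index recount: for each bucket, build per-keyword
--     posting sets of matching tag indices and score the bucket as the size of
--     their union (no per-tag any() short-circuit; duplicates handled by indices)."""
--     lowered = [t.lower() for t in tags]
--     scores = {}
--     for bucket, keywords in bucket_keywords.items():
--         matched = set()
--         for kw in keywords:
--             k = kw.lower()
--             for i, t in enumerate(lowered):
--                 if k in t:
--                     matched.add(i)
--         scores[bucket] = len(matched)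
--     return scores
-- ===== Notes on version B (the rewrite author's own statement) =====
-- stated objective: alternative
-- what changed: Replaced the tag-major nested scan with any()-short-circuit increments by a keyword-major inverted-index pass: each keyword produces a posting set of matching tag indices and a bucket's score is the cardinality of the union of its keywords' posting sets.
import Mathlib
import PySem

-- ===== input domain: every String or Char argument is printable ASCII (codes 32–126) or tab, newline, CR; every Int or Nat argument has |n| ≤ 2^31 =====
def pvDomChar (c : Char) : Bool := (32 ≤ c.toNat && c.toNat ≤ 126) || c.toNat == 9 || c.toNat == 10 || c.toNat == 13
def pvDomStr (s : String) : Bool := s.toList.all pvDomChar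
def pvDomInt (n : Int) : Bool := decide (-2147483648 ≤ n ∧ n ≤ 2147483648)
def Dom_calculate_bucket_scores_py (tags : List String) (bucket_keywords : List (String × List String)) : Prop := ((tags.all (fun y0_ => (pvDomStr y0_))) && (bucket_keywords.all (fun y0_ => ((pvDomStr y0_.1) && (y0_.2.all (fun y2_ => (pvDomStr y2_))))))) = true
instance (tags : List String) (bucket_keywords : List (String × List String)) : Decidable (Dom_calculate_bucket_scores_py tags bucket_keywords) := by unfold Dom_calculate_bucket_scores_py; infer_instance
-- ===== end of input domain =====

-- B replaces A's tag-major nested scan (any()-short-circuit, in-place increments) by a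
-- keyword-major inverted index: each keyword yields a posting set of matching tag indices,
-- and a bucket's score is the cardinality of the union of its keywords' posting sets (alternative).

-- ===== PORT A =====
-- A: scores = {bucket: 0}; for each tag, for each bucket, increment if any keyword.lower() in tag.lower()
def calculate_bucket_scores_py (tags : List String) (bucket_keywords : List (String × List String)) : List (String × Int) :=
  let bk := (PySem.Dict.ofList bucket_keywords).items
  let scores : PySem.Dict String Int := bk.foldl (fun d p => d.insert p.1 0) PySem.Dict.empty
  let scores := tags.foldl (fun d tag =>
      let tag_lower := PySem.Str.lower tag
      bk.foldl (fun d p =>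
        if p.2.any (fun keyword => PySem.Str.isIn (PySem.Str.lower keyword) tag_lower) then
          d.modify p.1 0 (· + 1)   -- scores[bucket] += 1 (key always present)
        else d) d) scores
  scores.items

-- ===== PORT B =====
-- B: lowered tags once; per bucket, union of per-keyword posting sets of tag indices; score = its size
def calculate_bucket_scores_py_alt (tags : List String) (bucket_keywords : List (String × List String)) : List (String × Int) :=
  let lowered := tags.map PySem.Str.lower
  ((PySem.Dict.ofList bucket_keywords).items).map (fun p =>
    let matched : PySem.Set Int := p.2.foldl (fun s kw =>
        let k := PySem.Str.lower kw
        (PySem.List.enumerate lowered).foldl (fun s it =>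
          if PySem.Str.isIn k it.2 then PySem.Set.add s it.1 else s) s)
      PySem.Set.empty
    (p.1, (matched.length : Int)))

-- ===== PRECONDITION & SPEC =====
def Spec_calculate_bucket_scores_py (tags : List String) (bucket_keywords : List (String × List String)) (out : List (String × Int)) : Prop := out = calculate_bucket_scores_py_alt tags bucket_keywords
instance (tags : List String) (bucket_keywords : List (String × List String)) (out : List (String × Int)) : Decidable (Spec_calculate_bucket_scores_py tags bucket_keywords out) := by unfold Spec_calculate_bucket_scores_py; infer_instance

-- ===== CLAIM (what is proved, stated in full; the proofs are below) =====
def Claim_equal_calculate_bucket_scores_py : Prop := ∀ (tags : List String) (bucket_keywords : List (String × List String)), Dom_calculate_bucket_scores_py tags bucket_keywords → Spec_calculate_bucket_scores_py tags bucket_keywords (calculate_bucket_scores_py tags bucket_keywords)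

-- ===== LEMMAS AND PROOFS =====

-- effect of one tag's inner bucket loop on one key's score
theorem pv_inner_getD (l : List (String × List String)) (P : String × List String → Bool)
    (d : PySem.Dict String Int) (k : String) :
    (l.foldl (fun d p => if P p then d.modify p.1 (0:Int) (· + 1) else d) d).getD k 0
      = d.getD k 0 + (l.countP (fun p => P p && p.1 == k) : Int) := by
  induction l generalizing d with
  | nil => simp
  | cons p l ih =>
    simp only [List.foldl_cons, List.countP_cons]
    rw [ih]
    by_cases hP : P p = true
    · rw [if_pos hP, PySem.Dict.getD_modify]
      rcases eq_or_ne k p.1 with hk | hk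
      · simp [hP, hk.symm]; ring
      · simp [hP, Ne.symm hk, hk]
    · simp [hP]

-- effect of the whole tag loop on one key's score
theorem pv_outer_getD (tags : List String) (l : List (String × List String))
    (pred : String → String × List String → Bool) (d : PySem.Dict String Int) (k : String) :
    (tags.foldl (fun d tag => l.foldl (fun d p => if pred tag p then d.modify p.1 (0:Int) (· + 1) else d) d) d).getD k 0
      = d.getD k 0 + ((tags.map (fun t => (l.countP (fun p => pred t p && p.1 == k) : Int))).sum) := by
  induction tags generalizing d with
  | nil => simp
  | cons t ts ih => simp only [List.foldl_cons, List.map_cons, List.sum_cons]; rw [ih, pv_inner_getD]; ring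

-- with unique keys, the countP keyed at p.1 singles out p itself
theorem pv_countP_key (l : List (String × List String)) (A : String × List String → Bool)
    (p : String × List String) (hp : p ∈ l) (hnd : (l.map Prod.fst).Nodup) :
    l.countP (fun q => A q && q.1 == p.1) = if A p then 1 else 0 := by
  induction l with
  | nil => simp at hp
  | cons q l ih =>
    simp only [List.map_cons, List.nodup_cons] at hnd
    rcases List.mem_cons.mp hp with h | h
    · subst h
      have hz : l.countP (fun q => A q && q.1 == p.1) = 0 := by
        rw [List.countP_eq_zero]
        intro r hr
        have : r.1 ≠ p.1 := fun he => hnd.1 (he ▸ List.mem_map_of_mem hr)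
        simp [this]
      rw [List.countP_cons, hz]
      by_cases hA : A p = true <;> simp [hA]
    · have hne : q.1 ≠ p.1 := by
        intro he
        exact hnd.1 (he ▸ List.mem_map_of_mem h)
      rw [List.countP_cons, ih h hnd.2]
      simp [hne]

-- the bucket loop of one tag modifies only keys already present, so keys are unchanged
theorem pv_inner_keys (l : List (String × List String)) (P : String × List String → Bool)
    (d : PySem.Dict String Int) (hc : ∀ p ∈ l, d.contains p.1 = true) :
    (l.foldl (fun d p => if P p then d.modify p.1 (0:Int) (· + 1) else d) d).keys = d.keys := by
  induction l generalizing d with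
  | nil => rfl
  | cons p l ih =>
    simp only [List.foldl_cons]
    by_cases hP : P p = true
    · rw [if_pos hP]
      have hk : (d.modify p.1 (0:Int) (· + 1)).keys = d.keys := by
        rw [PySem.Dict.keys_modify, PySem.Dict.keys_insert_of_contains (h := hc p (List.mem_cons_self))]
      rw [ih _ (fun q hq => by
        rw [PySem.Dict.contains_modify]
        simp [hc q (List.mem_cons_of_mem _ hq)]), hk]
    · rw [if_neg hP]
      exact ih _ (fun q hq => hc q (List.mem_cons_of_mem _ hq))

theorem pv_outer_keys (tags : List String) (l : List (String × List String))
    (pred : String → String × List String → Bool) (d : PySem.Dict String Int)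
    (hc : ∀ p ∈ l, d.contains p.1 = true) :
    (tags.foldl (fun d tag => l.foldl (fun d p => if pred tag p then d.modify p.1 (0:Int) (· + 1) else d) d) d).keys = d.keys := by
  induction tags generalizing d with
  | nil => rfl
  | cons t ts ih =>
    simp only [List.foldl_cons]
    have hk := pv_inner_keys l (pred t) d hc
    rw [ih _ (fun q hq => by
      rw [PySem.Dict.contains_iff_mem_keys, hk, ← PySem.Dict.contains_iff_mem_keys]
      exact hc q hq), hk]

-- membership in a conditional-add fold (one keyword's posting pass)
theorem pv_mem_condAdd {α : Type} (l : List (Int × α)) (q : Int × α → Bool)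
    (s : PySem.Set Int) (y : Int) :
    y ∈ l.foldl (fun s it => if q it then PySem.Set.add s it.1 else s) s
      ↔ y ∈ s ∨ ∃ it ∈ l, q it ∧ y = it.1 := by
  induction l generalizing s with
  | nil => simp
  | cons it l ih =>
    simp only [List.foldl_cons]
    rw [ih]
    by_cases h : q it = true
    · rw [if_pos h]
      rw [PySem.Set.mem_add]
      simp only [List.mem_cons]
      constructor
      · rintro ((hy | hy) | ⟨z, hz, hq', hy⟩)
        · exact Or.inl hy
        · exact Or.inr ⟨it, Or.inl rfl, h, hy⟩
        · exact Or.inr ⟨z, Or.inr hz, hq', hy⟩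
      · rintro (hy | ⟨z, (rfl | hz), hq', hy⟩)
        · exact Or.inl (Or.inl hy)
        · exact Or.inl (Or.inr hy)
        · exact Or.inr ⟨z, hz, hq', hy⟩
    · rw [if_neg h]
      simp only [List.mem_cons]
      constructor
      · rintro (hy | ⟨z, hz, hq, hy⟩)
        · exact Or.inl hy
        · exact Or.inr ⟨z, Or.inr hz, hq, hy⟩
      · rintro (hy | ⟨z, (rfl | hz), hq, hy⟩)
        · exact Or.inl hy
        · simp [h] at hq
        · exact Or.inr ⟨z, hz, hq, hy⟩

theorem pv_nodup_condAdd {α : Type} (l : List (Int × α)) (q : Int × α → Bool)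
    (s : PySem.Set Int) (h : s.Nodup) :
    (l.foldl (fun s it => if q it then PySem.Set.add s it.1 else s) s).Nodup := by
  induction l generalizing s with
  | nil => exact h
  | cons it l ih =>
    simp only [List.foldl_cons]
    by_cases hq : q it = true
    · rw [if_pos hq]; exact ih _ (PySem.Set.nodup_add _ _ h)
    · rw [if_neg hq]; exact ih _ h

-- membership in the whole keyword-major double fold
theorem pv_mem_double (kws : List String) (lowered : List String) (s : PySem.Set Int) (y : Int) :
    y ∈ kws.foldl (fun s kw =>
        (PySem.List.enumerate lowered).foldl (fun s it =>
          if PySem.Str.isIn (PySem.Str.lower kw) it.2 then PySem.Set.add s it.1 else s) s) s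
      ↔ y ∈ s ∨ ∃ it ∈ PySem.List.enumerate lowered,
          (kws.any (fun kw => PySem.Str.isIn (PySem.Str.lower kw) it.2)) ∧ y = it.1 := by
  induction kws generalizing s with
  | nil => simp
  | cons kw kws ih =>
    simp only [List.foldl_cons]
    rw [ih, pv_mem_condAdd]
    simp only [List.any_cons, Bool.or_eq_true]
    constructor
    · rintro ((hy | ⟨it, hit, hq, hy⟩) | ⟨it, hit, hq, hy⟩)
      · exact Or.inl hy
      · exact Or.inr ⟨it, hit, Or.inl hq, hy⟩
      · exact Or.inr ⟨it, hit, Or.inr hq, hy⟩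
    · rintro (hy | ⟨it, hit, (hq | hq), hy⟩)
      · exact Or.inl (Or.inl hy)
      · exact Or.inl (Or.inr ⟨it, hit, hq, hy⟩)
      · exact Or.inr ⟨it, hit, hq, hy⟩

theorem pv_nodup_double (kws : List String) (lowered : List String)
    (s : PySem.Set Int) (h : s.Nodup) :
    (kws.foldl (fun s kw =>
        (PySem.List.enumerate lowered).foldl (fun s it =>
          if PySem.Str.isIn (PySem.Str.lower kw) it.2 then PySem.Set.add s it.1 else s) s) s).Nodup := by
  induction kws generalizing s with
  | nil => exact h
  | cons kw kws ih =>
    simp only [List.foldl_cons]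
    exact ih _ (pv_nodup_condAdd _ _ _ h)

-- cardinality of the posting-set union = tag count of "some keyword matches"
theorem pv_len_matched (kws : List String) (lowered : List String) :
    (kws.foldl (fun s kw =>
        (PySem.List.enumerate lowered).foldl (fun s it =>
          if PySem.Str.isIn (PySem.Str.lower kw) it.2 then PySem.Set.add s it.1 else s) s)
      (PySem.Set.empty : PySem.Set Int)).length
      = lowered.countP (fun t => kws.any (fun kw => PySem.Str.isIn (PySem.Str.lower kw) t)) := by
  set enum := PySem.List.enumerate lowered with henum
  set q : Int × String → Bool := fun it => kws.any (fun kw => PySem.Str.isIn (PySem.Str.lower kw) it.2) with hq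
  set matched := kws.foldl (fun s kw =>
      enum.foldl (fun s it =>
        if PySem.Str.isIn (PySem.Str.lower kw) it.2 then PySem.Set.add s it.1 else s) s)
    (PySem.Set.empty : PySem.Set Int) with hm
  set T := (enum.filter q).map (·.1) with hT
  have hndM : matched.Nodup := pv_nodup_double kws lowered _ List.nodup_nil
  have hndT : T.Nodup := by
    have hsub : T.Sublist (enum.map (·.1)) := List.filter_sublist.map _
    have : (enum.map (·.1)).Nodup := by
      rw [henum, PySem.List.map_fst_enumerate]
      exact PySem.List.nodup_pyRange_one _ _
    exact hsub.nodup this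
  have hmem : ∀ y, y ∈ matched ↔ y ∈ T := by
    intro y
    rw [hm, pv_mem_double]
    simp only [hT, List.mem_map, List.mem_filter, PySem.Set.empty]
    constructor
    · rintro (hy | ⟨it, hit, hq', hy⟩)
      · simp at hy
      · exact ⟨it, ⟨hit, hq'⟩, hy.symm⟩
    · rintro ⟨it, ⟨hit, hq'⟩, hy⟩
      exact Or.inr ⟨it, hit, hq', hy.symm⟩
  have hperm : matched.Perm T := (List.perm_ext_iff_of_nodup hndM hndT).mpr hmem
  rw [hperm.length_eq, hT, List.length_map, ← List.countP_eq_length_filter]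
  have : lowered.countP (fun t => kws.any (fun kw => PySem.Str.isIn (PySem.Str.lower kw) t))
      = (enum.map (·.2)).countP (fun t => kws.any (fun kw => PySem.Str.isIn (PySem.Str.lower kw) t)) := by
    rw [henum, PySem.List.map_snd_enumerate]
  rw [this, List.countP_map]
  rfl

-- ===== VERDICT (by name: the statement is the Claim_ definition above) =====
theorem calculate_bucket_scores_py_spec : Claim_equal_calculate_bucket_scores_py := by
  intro tags bucket_keywords _
  unfold Spec_calculate_bucket_scores_py calculate_bucket_scores_py calculate_bucket_scores_py_alt
  set bk := (PySem.Dict.ofList bucket_keywords).items with hbk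
  have hnd : (bk.map Prod.fst).Nodup := PySem.Dict.nodup_keys_ofList bucket_keywords
  have hinit : (bk.foldl (fun d p => d.insert p.1 (0:Int)) PySem.Dict.empty).items
      = bk.map (fun p => (p.1, (0:Int))) := by
    have := PySem.Dict.items_foldl_insert_fresh bk Prod.fst (fun _ => (0:Int)) PySem.Dict.empty
      (by intro a _; simp [PySem.Dict.contains_empty]) hnd
    simpa using this
  set scores0 := bk.foldl (fun d p => d.insert p.1 (0:Int)) PySem.Dict.empty with hs0
  have hkeys0 : scores0.keys = bk.map Prod.fst := by
    show scores0.items.map Prod.fst = _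
    rw [hinit, List.map_map]; rfl
  have hc0 : ∀ p ∈ bk, scores0.contains p.1 = true := by
    intro p hp
    rw [PySem.Dict.contains_iff_mem_keys, hkeys0]
    exact List.mem_map_of_mem hp
  set pred : String → String × List String → Bool :=
    fun tag p => p.2.any (fun keyword => PySem.Str.isIn (PySem.Str.lower keyword) (PySem.Str.lower tag)) with hpred
  set final := tags.foldl (fun d tag =>
      bk.foldl (fun d p => if pred tag p then d.modify p.1 (0:Int) (· + 1) else d) d) scores0 with hfin
  have hkeysF : final.keys = bk.map Prod.fst := by rw [hfin, pv_outer_keys _ _ _ _ hc0, hkeys0]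
  have hndF : final.keys.Nodup := by rw [hkeysF]; exact hnd
  have hitems := PySem.Dict.items_eq_map_keys final hndF (0:Int)
  simp only []
  rw [hitems, hkeysF, List.map_map]
  apply List.map_congr_left
  intro p hp
  have hval : final.getD p.1 0 = (tags.countP (fun t => pred t p) : Int) := by
    rw [hfin, pv_outer_getD]
    have h0 : scores0.getD p.1 0 = 0 := by
      apply PySem.Dict.getD_of_mem_items
      · rw [hinit]; exact List.mem_map_of_mem hp
      · rw [hkeys0]; exact hnd
    rw [h0, zero_add]
    have hone : ∀ t, (bk.countP (fun q => pred t q && q.1 == p.1) : Int)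
        = if pred t p then (1:Int) else 0 := by
      intro t
      rw [pv_countP_key bk (pred t) p hp hnd]
      by_cases h : pred t p = true <;> simp [h]
    simp only [hone]
    exact PySem.List.sum_map_ite_one_zero (fun t => pred t p) tags
  simp only [Function.comp_apply]
  rw [hval, pv_len_matched]
  rw [List.countP_map]
  congr 1
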